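-- pv_equiv track=rewrite | github.com/nanako7z/novel-writer | scripts/style_analyze.py | detect_paralelism
-- ===== SOURCE A (Python) =====
-- def detect_paralelism(sentences: list[str]) -> int:
--     """Detect runs of >=3 consecutive sentences sharing the first 2 chars."""
--     if len(sentences) < 3:
--         return 0
--     runs = 0
--     i = 0
--     while i < len(sentences):
--         head = sentences[i][:2] if len(sentences[i]) >= 2 else ""
--         j = i
--         while j < len(sentences) and sentences[j][:2] == head and head:
--             j += 1
--         if j - i >= 3:
--             runs += 1
--         i = max(j, i + 1)
--     return runs
-- ===== SOURCE B (Python) =====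
-- def detect_paralelism(sentences: list[str]) -> int:
--     """Detect runs of >=3 consecutive sentences sharing the first 2 chars."""
--     runs = 0
--     prev = None
--     streak = 0
--     for s in sentences:
--         key = s[:2] if len(s) >= 2 else None
--         if key is not None and key == prev:
--             streak += 1
--         else:
--             streak = 1 if key is not None else 0
--         if streak == 3:
--             runs += 1
--         prev = key
--     return runs
-- ===== Notes on version B (the rewrite author's own statement) =====
-- stated objective: simpler
-- what changed: Replaced A's nested two-pointer index-jumping run scan with a single forward pass that keeps a running streak of equal two-char keys and counts a run exactly when the streak reaches 3.
import Mathlib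
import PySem

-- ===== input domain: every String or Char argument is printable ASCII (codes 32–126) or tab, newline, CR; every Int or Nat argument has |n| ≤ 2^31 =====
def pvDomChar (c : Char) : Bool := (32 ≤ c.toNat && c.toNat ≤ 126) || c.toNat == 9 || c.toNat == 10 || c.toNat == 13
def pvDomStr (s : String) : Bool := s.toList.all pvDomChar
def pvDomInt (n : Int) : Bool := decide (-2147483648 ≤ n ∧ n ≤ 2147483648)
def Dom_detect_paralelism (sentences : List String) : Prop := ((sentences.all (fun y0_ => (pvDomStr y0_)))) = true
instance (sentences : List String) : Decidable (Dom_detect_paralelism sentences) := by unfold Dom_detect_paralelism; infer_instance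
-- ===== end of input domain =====

-- B replaces A's nested two-pointer index-jumping run scan by a single forward pass that keeps a
-- running streak of equal two-char keys and counts a run exactly when the streak reaches 3 (objective: simpler).

-- ===== PORT A =====

def pvHead (s : String) : String :=
  if 2 ≤ PySem.Str.len s then PySem.Str.slice s none (some 2) else ""

def pvInner (xs : List String) (head : String) (j : Nat) : Nat :=
  if h : j < xs.length then
    if PySem.Str.slice xs[j] none (some 2) = head ∧ head ≠ "" then
      pvInner xs head (j + 1)
    else j
  else j
termination_by xs.length - j
decreasing_by omega

def pvOuter (xs : List String) (i : Nat) (runs : Int) : Int :=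
  if h : i < xs.length then
    let head := pvHead xs[i]
    let j := pvInner xs head i
    let runs' := if 3 ≤ (j : Int) - (i : Int) then runs + 1 else runs
    pvOuter xs (max j (i + 1)) runs'
  else runs
termination_by xs.length - i
decreasing_by omega

def detect_paralelism (sentences : List String) : Int :=
  if sentences.length < 3 then 0 else pvOuter sentences 0 0

-- ===== PORT B =====
def pvKey (s : String) : Option String :=
  if 2 ≤ PySem.Str.len s then some (PySem.Str.slice s none (some 2)) else none

def pvStep (st : Int × Option String × Int) (s : String) : Int × Option String × Int :=
  let key := pvKey s
  let streak := if key ≠ none ∧ key = st.2.1 then st.2.2 + 1 else if key ≠ none then 1 else 0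
  let runs := if streak = 3 then st.1 + 1 else st.1
  (runs, key, streak)

def detect_paralelism_alt (sentences : List String) : Int :=
  (sentences.foldl pvStep (0, none, 0)).1


-- ===== PRECONDITION & SPEC =====
def Spec_detect_paralelism (sentences : List String) (out : Int) : Prop := out = detect_paralelism_alt sentences
instance (sentences : List String) (out : Int) : Decidable (Spec_detect_paralelism sentences out) := by unfold Spec_detect_paralelism; infer_instance

-- ===== CLAIM (what is proved, stated in full; the proofs are below) =====
def Claim_equal_detect_paralelism : Prop := ∀ (sentences : List String), Dom_detect_paralelism sentences → Spec_detect_paralelism sentences (detect_paralelism sentences)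

-- ===== LEMMAS AND PROOFS =====

def contB : List String → Option String → Int → Int
  | [], _, _ => 0
  | s :: t, p, c =>
    let key := pvKey s
    let streak := if key ≠ none ∧ key = p then c + 1 else if key ≠ none then 1 else 0
    (if streak = 3 then 1 else 0) + contB t key streak

lemma foldl_pvStep_fst (xs : List String) : ∀ r p c,
    (xs.foldl pvStep (r, p, c)).1 = r + contB xs p c := by
  induction xs with
  | nil => intro r p c; simp [contB]
  | cons s t ih =>
    intro r p c
    simp only [List.foldl_cons, pvStep, contB]
    rw [ih]
    split_ifs <;> ring

lemma contB_reset (s : String) (t : List String) (p : Option String) (c : Int)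
    (h : pvKey s ≠ p) : contB (s :: t) p c = contB (s :: t) none 0 := by
  simp only [contB]
  by_cases hk : pvKey s = none
  · simp [hk]
  · simp [hk, h]

lemma contB_block (blk : List String) : ∀ (rest : List String) (k : String) (c : Int), 0 ≤ c →
    (∀ s ∈ blk, pvKey s = some k) →
    (∀ s t', rest = s :: t' → pvKey s ≠ some k) →
    contB (blk ++ rest) (some k) c
      = (if c < 3 ∧ 3 ≤ c + blk.length then 1 else 0) + contB rest none 0 := by
  induction blk with
  | nil =>
    intro rest k c hc _ hr
    have hif : (if c < 3 ∧ 3 ≤ c + ((([] : List String)).length : Int) then (1:Int) else 0) = 0 := by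
      simp only [List.length_nil, Int.natCast_zero, add_zero]
      split_ifs with h0
      · omega
      · rfl
    match rest with
    | [] => simp [contB]
    | s :: t' =>
      rw [List.nil_append, contB_reset s t' (some k) c (hr s t' rfl), hif, zero_add]
  | cons s blk ih =>
    intro rest k c hc hblk hr
    have hs : pvKey s = some k := hblk s (by simp)
    simp only [List.cons_append, contB, hs, ne_eq, reduceCtorEq, not_false_eq_true, true_and,
      if_true]
    rw [ih rest k (c+1) (by omega) (fun x hx => hblk x (by simp [hx])) hr]
    simp only [List.length_cons]
    split_ifs <;> push_cast at * <;> omega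

lemma len_slice2 (s : String) :
    (PySem.Str.slice s none (some 2)).toList.length = min 2 s.toList.length := by
  rw [PySem.Str.toList_slice, PySem.Chars.slice_eq_listSlice,
    PySem.List.slice_to _ (by norm_num)]
  simp [List.length_take]

lemma pvKey_eq_some_iff (s k : String) (hk : k.toList.length = 2) :
    pvKey s = some k ↔ PySem.Str.slice s none (some 2) = k := by
  constructor
  · intro h
    unfold pvKey at h
    split at h
    · simpa using h
    · simp at h
  · intro h
    have hlen : min 2 s.toList.length = 2 := by rw [← len_slice2, h, hk]
    have hx : s.toList.length = s.length := by simp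
    simp [pvKey, h]
    omega

lemma pvInner_empty_head (xs : List String) (j : Nat) : pvInner xs "" j = j := by
  rw [pvInner]; split <;> simp

lemma pvInner_char (xs : List String) (head : String) (hh : head ≠ "") : ∀ n j, xs.length - j = n →
    pvInner xs head j
      = j + ((xs.drop j).takeWhile
          (fun s => decide (PySem.Str.slice s none (some 2) = head))).length := by
  intro n
  induction n with
  | zero =>
    intro j hj
    have : xs.length ≤ j := by omega
    rw [pvInner, dif_neg (by omega), List.drop_eq_nil_of_le this]
    simp
  | succ m ih =>
    intro j hj
    have hjlt : j < xs.length := by omega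
    have hdrop : xs.drop j = xs[j] :: xs.drop (j + 1) := (List.getElem_cons_drop hjlt).symm
    rw [pvInner, dif_pos hjlt, hdrop]
    by_cases hp : PySem.Str.slice xs[j] none (some 2) = head
    · rw [if_pos ⟨hp, hh⟩, ih (j + 1) (by omega), List.takeWhile_cons_of_pos (by simp [hp])]
      simp; omega
    · rw [if_neg (by tauto), List.takeWhile_cons_of_neg (by simp [hp])]
      simp

lemma contB_short (xs : List String) (h : xs.length < 3) : contB xs none 0 = 0 := by
  match xs, h with
  | [], _ => rfl
  | [a], _ =>
    simp only [contB]
    split_ifs <;> omega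
  | [a, b], _ =>
    simp only [contB]
    split_ifs <;> omega

lemma drop_len_takeWhile (p : String → Bool) (l : List String) :
    l.drop (l.takeWhile p).length = l.dropWhile p := by
  have h := List.takeWhile_append_dropWhile (p := p) (l := l)
  nth_rewrite 2 [← h]
  rw [List.drop_left]

lemma contB_split (hd : String) (hlen2 : hd.toList.length = 2) (y : String) (t : List String)
    (hy : PySem.Str.slice y none (some 2) = hd) :
    contB (y :: t) none 0
      = (if 3 ≤ ((y :: t).takeWhile
            (fun s => decide (PySem.Str.slice s none (some 2) = hd))).length then (1:Int) else 0)
        + contB ((y :: t).dropWhile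
            (fun s => decide (PySem.Str.slice s none (some 2) = hd))) none 0 := by
  have hky : pvKey y = some hd := (pvKey_eq_some_iff y hd hlen2).mpr hy
  rw [List.takeWhile_cons_of_pos (by simp [hy]), List.dropWhile_cons_of_pos (by simp [hy])]
  have h1 : contB (y :: t) none 0 = contB t (some hd) 1 := by
    simp [contB, hky]
  rw [h1]
  have hsplit := List.takeWhile_append_dropWhile
    (p := fun s => decide (PySem.Str.slice s none (some 2) = hd)) (l := t)
  nth_rewrite 1 [← hsplit]
  rw [contB_block _ _ hd 1 (by omega)
    (fun s hs => (pvKey_eq_some_iff s hd hlen2).mpr (by simpa using List.mem_takeWhile_imp hs))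
    (fun s t' he hk => by
      have h0 : t.dropWhile (fun s => decide (PySem.Str.slice s none (some 2) = hd)) ≠ [] := by
        rw [he]; simp
      have hfail := List.head_dropWhile_not _ h0
      simp only [he, List.head_cons, decide_eq_false_iff_not] at hfail
      exact hfail ((pvKey_eq_some_iff s hd hlen2).mp hk))]
  simp only [List.length_cons]
  have hnorm : ((1:Int) < 3 ∧ 3 ≤ 1 + ((t.takeWhile
      (fun s => decide (PySem.Str.slice s none (some 2) = hd))).length : Int))
      ↔ 3 ≤ (t.takeWhile (fun s => decide (PySem.Str.slice s none (some 2) = hd))).length + 1 := by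
    omega
  rw [if_congr hnorm rfl rfl]
  rfl

lemma pvOuter_eq (xs : List String) : ∀ n i runs, xs.length - i = n →
    pvOuter xs i runs = runs + contB (xs.drop i) none 0 := by
  intro n
  induction n using Nat.strong_induction_on with
  | _ n IH =>
    intro i runs hn
    by_cases hi : i < xs.length
    · have hdrop : xs.drop i = xs[i] :: xs.drop (i + 1) := (List.getElem_cons_drop hi).symm
      rw [pvOuter, dif_pos hi]
      show pvOuter xs (max (pvInner xs (pvHead xs[i]) i) (i + 1))
          (if 3 ≤ ((pvInner xs (pvHead xs[i]) i : Int)) - (i : Int) then runs + 1 else runs)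
        = runs + contB (xs.drop i) none 0
      by_cases h2 : 2 ≤ PySem.Str.len xs[i]
      · have hH : pvHead xs[i] = PySem.Str.slice xs[i] none (some 2) := by
          rw [pvHead, if_pos h2]
        have h2' : 2 ≤ xs[i].toList.length := by
          rw [PySem.Str.len_eq] at h2; exact_mod_cast h2
        have hlen2 : (pvHead xs[i]).toList.length = 2 := by
          rw [hH, len_slice2]; omega
        have hh : pvHead xs[i] ≠ "" := by
          intro h0; rw [h0] at hlen2; simp at hlen2
        rw [pvInner_char xs (pvHead xs[i]) hh (xs.length - i) i rfl]
        have ht1 : 1 ≤ ((xs.drop i).takeWhile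
            (fun s => decide (PySem.Str.slice s none (some 2) = pvHead xs[i]))).length := by
          rw [hdrop, List.takeWhile_cons_of_pos (by simp [hH])]
          simp
        rw [Nat.max_eq_left (by omega)]
        rw [IH (xs.length - (i + ((xs.drop i).takeWhile
              (fun s => decide (PySem.Str.slice s none (some 2) = pvHead xs[i]))).length))
            (by omega) _ _ rfl]
        have hdr : xs.drop (i + ((xs.drop i).takeWhile
              (fun s => decide (PySem.Str.slice s none (some 2) = pvHead xs[i]))).length)
            = (xs.drop i).dropWhile
              (fun s => decide (PySem.Str.slice s none (some 2) = pvHead xs[i])) := by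
          rw [← List.drop_drop, drop_len_takeWhile]
        rw [hdr, hdrop, contB_split (pvHead xs[i]) hlen2 xs[i] (xs.drop (i + 1)) hH.symm]
        split_ifs <;> push_cast at * <;> omega
      · have hH : pvHead xs[i] = "" := by rw [pvHead, if_neg h2]
        rw [hH, pvInner_empty_head, if_neg (by omega), Nat.max_eq_right (by omega)]
        rw [IH (xs.length - (i + 1)) (by omega) (i + 1) runs rfl]
        have hkey : pvKey xs[i] = none := by rw [pvKey, if_neg h2]
        rw [hdrop]
        simp [contB, hkey]
    · rw [pvOuter, dif_neg hi, List.drop_eq_nil_of_le (by omega)]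
      simp [contB]

-- ===== VERDICT (by name: the statement is the Claim_ definition above) =====
theorem detect_paralelism_spec : Claim_equal_detect_paralelism := by
  intro xs _
  unfold Spec_detect_paralelism detect_paralelism detect_paralelism_alt
  rw [foldl_pvStep_fst, zero_add]
  by_cases h : xs.length < 3
  · simp [h, contB_short xs h]
  · simp only [h, if_false]
    simpa using pvOuter_eq xs (xs.length) 0 0 (by omega)
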